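-- pv_equiv track=rewrite | github.com/0xShun/Anomaly-Detection-in-Network-Logs | dashboard/consumers.py | _map_service_to_log_type
-- ===== SOURCE A (Python) =====
-- def _map_service_to_log_type(service):
--     """Map Linux service/process name to log type"""
--     service_lower = service.lower()
--
--     if 'kernel' in service_lower:
--         return 'kernel'
--     elif any(x in service_lower for x in ['error', 'fail', 'crit']):
--         return 'error'
--     elif any(x in service_lower for x in ['warn']):
--         return 'warning'
--     elif any(x in service_lower for x in ['syslog', 'auth', 'sudo']):
--         return 'auth'
--     else:
--         return 'info'
-- ===== SOURCE B (Python) =====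
-- _PRIORITY = {
--     'kernel': 0,
--     'error': 1, 'fail': 1, 'crit': 1,
--     'warn': 2,
--     'syslog': 3, 'auth': 3, 'sudo': 3,
-- }
-- _LABELS = ('kernel', 'error', 'warning', 'auth', 'info')
--
--
-- def _map_service_to_log_type(service):
--     s = service.lower()
--     best = min((p for kw, p in _PRIORITY.items() if kw in s), default=4)
--     return _LABELS[best]
-- ===== Notes on version B (the rewrite author's own statement) =====
-- stated objective: alternative
-- what changed: Instead of a short-circuiting first-match priority cascade over keyword groups, B assigns each keyword a numeric priority, aggregates the MINIMUM priority over all keywords present in the lowercased string, and indexes a label table with it (default 'info').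
import Mathlib
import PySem

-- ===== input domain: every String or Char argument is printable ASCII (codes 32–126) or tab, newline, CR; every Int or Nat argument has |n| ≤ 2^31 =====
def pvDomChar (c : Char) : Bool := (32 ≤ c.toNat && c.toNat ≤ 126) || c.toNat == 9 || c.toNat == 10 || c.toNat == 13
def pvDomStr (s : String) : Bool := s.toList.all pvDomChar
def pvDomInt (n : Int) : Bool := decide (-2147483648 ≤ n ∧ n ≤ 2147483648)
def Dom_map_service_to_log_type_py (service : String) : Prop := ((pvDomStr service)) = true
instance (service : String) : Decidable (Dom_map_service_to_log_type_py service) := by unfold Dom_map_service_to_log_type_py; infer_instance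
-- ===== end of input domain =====

-- B replaces A's short-circuiting keyword-group cascade by a min-priority aggregation over a
-- keyword→priority table, then indexes a label table (alternative decomposition, same cost).

-- ===== PORT A =====
def map_service_to_log_type_py (service : String) : String :=
  let service_lower := PySem.Str.lower service
  if PySem.Str.isIn "kernel" service_lower then "kernel"
  else if ["error", "fail", "crit"].any (fun x => PySem.Str.isIn x service_lower) then "error"
  else if ["warn"].any (fun x => PySem.Str.isIn x service_lower) then "warning"
  else if ["syslog", "auth", "sudo"].any (fun x => PySem.Str.isIn x service_lower) then "auth"
  else "info"

-- ===== PORT B =====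
def pvPriority : List (String × Nat) :=
  [("kernel", 0), ("error", 1), ("fail", 1), ("crit", 1),
   ("warn", 2), ("syslog", 3), ("auth", 3), ("sudo", 3)]

def pvLabels : List String := ["kernel", "error", "warning", "auth", "info"]

def map_service_to_log_type_py_alt (service : String) : String :=
  let s := PySem.Str.lower service
  -- min over the priorities of the keywords occurring in s, default 4
  let best := pvPriority.foldl (fun b kp => if PySem.Str.isIn kp.1 s then min b kp.2 else b) 4
  pvLabels.getD best "info"

-- ===== PRECONDITION & SPEC =====
def Spec_map_service_to_log_type_py (service : String) (out : String) : Prop := out = map_service_to_log_type_py_alt service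
instance (service : String) (out : String) : Decidable (Spec_map_service_to_log_type_py service out) := by unfold Spec_map_service_to_log_type_py; infer_instance

-- ===== CLAIM (what is proved, stated in full; the proofs are below) =====
def Claim_equal_map_service_to_log_type_py : Prop := ∀ (service : String), Dom_map_service_to_log_type_py service → Spec_map_service_to_log_type_py service (map_service_to_log_type_py service)

-- ===== LEMMAS AND PROOFS =====

-- ===== VERDICT (by name: the statement is the Claim_ definition above) =====
set_option maxHeartbeats 2000000 in
theorem map_service_to_log_type_py_spec : Claim_equal_map_service_to_log_type_py := by
  intro s _
  unfold Spec_map_service_to_log_type_py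
  simp only [map_service_to_log_type_py, map_service_to_log_type_py_alt, pvPriority, pvLabels,
    List.foldl, List.any]
  rcases Bool.eq_false_or_eq_true (PySem.Str.isIn "kernel" (PySem.Str.lower s)) with h1|h1 <;>
  rcases Bool.eq_false_or_eq_true (PySem.Str.isIn "error" (PySem.Str.lower s)) with h2|h2 <;>
  rcases Bool.eq_false_or_eq_true (PySem.Str.isIn "fail" (PySem.Str.lower s)) with h3|h3 <;>
  rcases Bool.eq_false_or_eq_true (PySem.Str.isIn "crit" (PySem.Str.lower s)) with h4|h4 <;>
  rcases Bool.eq_false_or_eq_true (PySem.Str.isIn "warn" (PySem.Str.lower s)) with h5|h5 <;>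
  rcases Bool.eq_false_or_eq_true (PySem.Str.isIn "syslog" (PySem.Str.lower s)) with h6|h6 <;>
  rcases Bool.eq_false_or_eq_true (PySem.Str.isIn "auth" (PySem.Str.lower s)) with h7|h7 <;>
  rcases Bool.eq_false_or_eq_true (PySem.Str.isIn "sudo" (PySem.Str.lower s)) with h8|h8 <;>
  simp only [h1, h2, h3, h4, h5, h6, h7, h8] <;> rfl
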